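-- pv_equiv track=rewrite | github.com/jesmaelnezhad/market-physics | pairslib.py | division_equals
-- ===== SOURCE A (Python) =====
-- def break_pair(pair):
--     return pair[0:3], pair[3:]
--
-- def add_to_count_map(element, count_map):
--     if element in count_map:
--         count_map[element] += 1
--     else:
--         count_map[element] = 1
--
-- def division_equals(numinators, denominators, pair):
--     # currency to its count
--     numinator_currencies = {}
--     denominator_currencies = {}
--     for n in numinators:
--         c1, c2 = break_pair(n)
--         add_to_count_map(c1, numinator_currencies)
--         add_to_count_map(c2, denominator_currencies)
--     for d in denominators:
--         c1, c2 = break_pair(d)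
--         add_to_count_map(c2, numinator_currencies)
--         add_to_count_map(c1, denominator_currencies)
--     c1, c2 = break_pair(pair)
--     add_to_count_map(c2, numinator_currencies)
--     add_to_count_map(c1, denominator_currencies)
--
--     return numinator_currencies == denominator_currencies
-- ===== SOURCE B (Python) =====
-- def division_equals(numinators, denominators, pair):
--     # Sort-then-compare: the two currency multisets are equal iff their sorted lists are equal.
--     nums = [n[:3] for n in numinators] + [d[3:] for d in denominators] + [pair[3:]]
--     dens = [n[3:] for n in numinators] + [d[:3] for d in denominators] + [pair[:3]]
--     return sorted(nums) == sorted(dens)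
-- ===== Notes on version B (the rewrite author's own statement) =====
-- stated objective: alternative
-- what changed: Replaces A's two count maps compared with dict equality by building the two currency lists in staged passes and comparing their sorted forms (sort-then-compare instead of hashing/counting).
import Mathlib
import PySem

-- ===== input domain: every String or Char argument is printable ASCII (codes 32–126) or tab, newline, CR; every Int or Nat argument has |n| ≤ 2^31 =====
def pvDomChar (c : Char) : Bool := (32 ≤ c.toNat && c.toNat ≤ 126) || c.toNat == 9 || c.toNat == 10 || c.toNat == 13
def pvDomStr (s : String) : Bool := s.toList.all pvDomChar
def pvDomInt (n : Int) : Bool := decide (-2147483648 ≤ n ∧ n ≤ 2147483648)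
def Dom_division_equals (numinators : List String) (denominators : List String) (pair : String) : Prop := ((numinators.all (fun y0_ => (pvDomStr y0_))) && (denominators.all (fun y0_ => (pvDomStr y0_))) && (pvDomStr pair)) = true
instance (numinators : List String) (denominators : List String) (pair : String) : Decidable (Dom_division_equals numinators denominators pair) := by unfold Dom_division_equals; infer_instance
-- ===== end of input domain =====

-- B replaces A's two count maps compared with dict equality by sort-then-compare on the two currency lists (objective: alternative).

-- ===== PORT A =====
-- break_pair(pair) = (pair[0:3], pair[3:])
def breakPair (p : String) : String × String :=
  (PySem.Str.slice p (some 0) (some 3), PySem.Str.slice p (some 3) none)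

-- add_to_count_map: if element in count_map: +=1 else: =1
def addToCountMap (e : String) (m : PySem.Dict String Int) : PySem.Dict String Int :=
  if m.contains e then m.insert e (m.getD e 0 + 1) else m.insert e 1

-- Python dict ==: same keys as a set, same value at every key (insertion order ignored)
def pyDictEq (d1 d2 : PySem.Dict String Int) : Bool :=
  PySem.Set.equal (PySem.Set.ofList d1.keys) (PySem.Set.ofList d2.keys) &&
    d1.keys.all (fun k => d1.get? k == d2.get? k)

def division_equals (numinators : List String) (denominators : List String) (pair : String) : Bool :=
  let st1 := numinators.foldl
    (fun (st : PySem.Dict String Int × PySem.Dict String Int) n =>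
      (addToCountMap (breakPair n).1 st.1, addToCountMap (breakPair n).2 st.2))
    (PySem.Dict.empty, PySem.Dict.empty)
  let st2 := denominators.foldl
    (fun (st : PySem.Dict String Int × PySem.Dict String Int) d =>
      (addToCountMap (breakPair d).2 st.1, addToCountMap (breakPair d).1 st.2))
    st1
  let dn := addToCountMap (breakPair pair).2 st2.1
  let dd := addToCountMap (breakPair pair).1 st2.2
  pyDictEq dn dd

-- ===== PORT B =====
-- nums = [n[:3] for n] + [d[3:] for d] + [pair[3:]]; dens mirrored; sorted(nums) == sorted(dens)
def division_equals_alt (numinators : List String) (denominators : List String) (pair : String) : Bool :=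
  let nums := numinators.map (fun n => PySem.Str.slice n (some 0) (some 3)) ++
              denominators.map (fun d => PySem.Str.slice d (some 3) none) ++
              [PySem.Str.slice pair (some 3) none]
  let dens := numinators.map (fun n => PySem.Str.slice n (some 3) none) ++
              denominators.map (fun d => PySem.Str.slice d (some 0) (some 3)) ++
              [PySem.Str.slice pair (some 0) (some 3)]
  PySem.List.sorted nums (fun x => x) false == PySem.List.sorted dens (fun x => x) false

-- ===== PRECONDITION & SPEC =====
def Spec_division_equals (numinators : List String) (denominators : List String) (pair : String) (out : Bool) : Prop := out = division_equals_alt numinators denominators pair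
instance (numinators : List String) (denominators : List String) (pair : String) (out : Bool) : Decidable (Spec_division_equals numinators denominators pair out) := by unfold Spec_division_equals; infer_instance

-- ===== CLAIM (what is proved, stated in full; the proofs are below) =====
def Claim_equal_division_equals : Prop := ∀ (numinators : List String) (denominators : List String) (pair : String), Dom_division_equals numinators denominators pair → Spec_division_equals numinators denominators pair (division_equals numinators denominators pair)

-- ===== LEMMAS AND PROOFS =====

-- the currencies counted in A's numerator map / denominator map (= B's nums / dens lists)
def pvL1 (ns ds : List String) (p : String) : List String :=
  ns.map (fun s => PySem.Str.slice s (some 0) (some 3)) ++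
  ds.map (fun s => PySem.Str.slice s (some 3) none) ++
  [PySem.Str.slice p (some 3) none]
def pvL2 (ns ds : List String) (p : String) : List String :=
  ns.map (fun s => PySem.Str.slice s (some 3) none) ++
  ds.map (fun s => PySem.Str.slice s (some 0) (some 3)) ++
  [PySem.Str.slice p (some 0) (some 3)]

-- A's counting fold over a plain list of currencies
def foldG (L : List String) (d : PySem.Dict String Int) : PySem.Dict String Int :=
  L.foldl (fun d x => d.insert x (d.getD x 0 + 1)) d

lemma addToCountMap_eq (e : String) (m : PySem.Dict String Int) :
    addToCountMap e m = m.insert e (m.getD e 0 + 1) := by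
  unfold addToCountMap
  by_cases h : m.contains e = true
  · simp [h]
  · have h0 : m.getD e 0 = 0 :=
      PySem.Dict.getD_of_not_contains m 0 (by simpa using h)
    simp [h, h0]

lemma foldl_pair_split (l : List String) (f g : String → String)
    (a b : PySem.Dict String Int) :
    l.foldl (fun st n => (addToCountMap (f n) st.1, addToCountMap (g n) st.2)) (a, b)
      = (foldG (l.map f) a, foldG (l.map g) b) := by
  induction l generalizing a b with
  | nil => simp [foldG]
  | cons x l ih =>
    simp only [List.foldl_cons, List.map_cons]
    rw [ih]
    simp [foldG, addToCountMap_eq]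

lemma foldG_append (L M : List String) (d : PySem.Dict String Int) :
    foldG (L ++ M) d = foldG M (foldG L d) := by
  simp [foldG]

lemma getD_foldG (L : List String) (d : PySem.Dict String Int) (k : String) :
    (foldG L d).getD k 0 = d.getD k 0 + L.count k :=
  PySem.Dict.getD_foldl_insert_add_one L d k

lemma mem_keys_foldG (L : List String) (d : PySem.Dict String Int) (k : String) :
    k ∈ (foldG L d).keys ↔ k ∈ d.keys ∨ k ∈ L := by
  induction L generalizing d with
  | nil => simp [foldG]
  | cons x L ih =>
    simp only [foldG, List.foldl_cons] at *
    rw [ih]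
    simp [PySem.Dict.mem_keys_insert]
    tauto

lemma get?_eq_some_getD (d : PySem.Dict String Int) (k : String) (h : k ∈ d.keys) :
    d.get? k = some (d.getD k 0) := by
  rcases hg : d.get? k with _ | v
  · exact absurd ((PySem.Dict.get?_eq_none_iff_not_mem_keys d k).mp hg) (not_not_intro h)
  · rw [PySem.Dict.getD_of_get?_eq_some d 0 hg]

-- characterisation of A's answer
lemma pyDictEq_count (L1 L2 : List String) :
    pyDictEq (foldG L1 PySem.Dict.empty) (foldG L2 PySem.Dict.empty) = true
      ↔ ∀ k : String, L1.count k = L2.count k := by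
  have hk1 : ∀ k, k ∈ (foldG L1 PySem.Dict.empty).keys ↔ k ∈ L1 := by
    intro k; rw [mem_keys_foldG]; simp
  have hk2 : ∀ k, k ∈ (foldG L2 PySem.Dict.empty).keys ↔ k ∈ L2 := by
    intro k; rw [mem_keys_foldG]; simp
  have hg1 : ∀ k, (foldG L1 PySem.Dict.empty).getD k 0 = L1.count k := by
    intro k; rw [getD_foldG]; simp
  have hg2 : ∀ k, (foldG L2 PySem.Dict.empty).getD k 0 = L2.count k := by
    intro k; rw [getD_foldG]; simp
  unfold pyDictEq
  rw [Bool.and_eq_true]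
  constructor
  · rintro ⟨heq, hall⟩ k
    have hset : ∀ x, x ∈ (foldG L1 PySem.Dict.empty).keys ↔ x ∈ (foldG L2 PySem.Dict.empty).keys := by
      intro x
      have := (PySem.Set.equal_iff _ _).mp heq x
      simpa [PySem.Set.mem_ofList] using this
    by_cases h1 : k ∈ L1
    · have hm1 := (hk1 k).mpr h1
      have hm2 := (hset k).mp hm1
      have hv := List.all_eq_true.mp hall k hm1
      rw [get?_eq_some_getD _ _ hm1, get?_eq_some_getD _ _ hm2] at hv
      have hv' : (foldG L1 PySem.Dict.empty).getD k 0
          = (foldG L2 PySem.Dict.empty).getD k 0 := by simpa using hv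
      rw [hg1, hg2] at hv'
      exact_mod_cast hv'
    · by_cases h2 : k ∈ L2
      · exact absurd ((hk1 k).mp ((hset k).mpr ((hk2 k).mpr h2))) h1
      · simp [List.count_eq_zero_of_not_mem h1, List.count_eq_zero_of_not_mem h2]
  · intro hcnt
    have hmem : ∀ k, k ∈ L1 ↔ k ∈ L2 := by
      intro k
      rw [← List.count_pos_iff, ← List.count_pos_iff, hcnt k]
    refine ⟨(PySem.Set.equal_iff _ _).mpr fun k => by
      simpa [PySem.Set.mem_ofList, hk1 k, hk2 k] using hmem k, ?_⟩
    apply List.all_eq_true.mpr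
    intro k hmk
    have h1 : k ∈ L1 := (hk1 k).mp hmk
    have h2 : k ∈ L2 := (hmem k).mp h1
    rw [get?_eq_some_getD _ _ hmk, get?_eq_some_getD _ _ ((hk2 k).mpr h2)]
    simp [hg1, hg2, hcnt k]

lemma A_eq (ns ds : List String) (p : String) :
    division_equals ns ds p
      = pyDictEq (foldG (pvL1 ns ds p) PySem.Dict.empty)
                 (foldG (pvL2 ns ds p) PySem.Dict.empty) := by
  simp only [division_equals, breakPair]
  rw [foldl_pair_split ns (fun s => PySem.Str.slice s (some 0) (some 3))
        (fun s => PySem.Str.slice s (some 3) none)]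
  rw [foldl_pair_split ds (fun s => PySem.Str.slice s (some 3) none)
        (fun s => PySem.Str.slice s (some 0) (some 3))]
  unfold pvL1 pvL2
  rw [foldG_append, foldG_append, foldG_append, foldG_append,
      addToCountMap_eq, addToCountMap_eq]
  rfl

-- characterisation of B's answer: sorted(nums) == sorted(dens) iff the lists are permutations
lemma B_eq (ns ds : List String) (p : String) :
    division_equals_alt ns ds p = true ↔ (pvL1 ns ds p).Perm (pvL2 ns ds p) := by
  simp only [division_equals_alt, beq_iff_eq]
  exact PySem.List.sorted_id_eq_sorted_id_iff_perm _ _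

-- ===== VERDICT (by name: the statement is the Claim_ definition above) =====
theorem division_equals_spec : Claim_equal_division_equals := by
  intro ns ds p _
  unfold Spec_division_equals
  rw [A_eq]
  have h : (pyDictEq (foldG (pvL1 ns ds p) PySem.Dict.empty)
      (foldG (pvL2 ns ds p) PySem.Dict.empty) = true)
      ↔ division_equals_alt ns ds p = true := by
    rw [pyDictEq_count, B_eq, List.perm_iff_count]
  rcases hA : pyDictEq (foldG (pvL1 ns ds p) PySem.Dict.empty)
      (foldG (pvL2 ns ds p) PySem.Dict.empty) with _ | _
  · rcases hB : division_equals_alt ns ds p with _ | _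
    · rfl
    · exact absurd (h.mpr hB) (by simp [hA])
  · exact (h.mp hA).symm
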